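-- pv_equiv track=rewrite | github.com/pkaff/AdventOfCode | 2021/Day22/part2.py | split_active_cuboid
-- ===== SOURCE A (Python) =====
-- def get_overlap(r1, r2):
--     if r2[0] > r1[1] or r1[0] > r2[1]:
--         return None
--     return [max(r1[0], r2[0]), min(r1[1], r2[1])]
--
-- def split_active_cuboid(active_cuboid, new_cuboid):
--     xa, ya, za = active_cuboid
--     xn, yn, zn = new_cuboid
--
--     xinter = get_overlap(xa, xn)
--     yinter = get_overlap(ya, yn)
--     zinter = get_overlap(za, zn)
--
--     if not all([xinter, yinter, zinter]):
--         return [active_cuboid]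
--
--     active_cuboid_split = []
--     active_cuboid_split.append([xa, ya, [za[0], zinter[0] - 1]])
--     active_cuboid_split.append([xa, ya, [zinter[1] + 1, za[1]]])
--     active_cuboid_split.append([[xa[0], xinter[0] - 1], ya, zinter])
--     active_cuboid_split.append([[xinter[1] + 1, xa[1]], ya, zinter])
--     active_cuboid_split.append([xinter, [ya[0], yinter[0] - 1], zinter])
--     active_cuboid_split.append([xinter, [yinter[1] + 1, ya[1]], zinter])
--
--     return [(x, y, z) for x, y, z in active_cuboid_split if x[0] <= x[1] and y[0] <= y[1] and z[0] <= z[1]]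
-- ===== SOURCE B (Python) =====
-- def _carve(box, cuts):
--     # Recursively subtract the cut prefix from the box: emit the below/above
--     # slabs for the head axis, then prepend the clipped overlap interval to
--     # every piece carved out of the tail axes.
--     if not box:
--         return []
--     head, rest = box[0], box[1:]
--     lo, hi = cuts[0]
--     slabs = [[[head[0], lo - 1]] + rest, [[hi + 1, head[1]]] + rest]
--     return slabs + [[[lo, hi]] + p for p in _carve(rest, cuts[1:])]
--
-- def split_active_cuboid(active_cuboid, new_cuboid):
--     xa, ya, za = active_cuboid
--     xn, yn, zn = new_cuboid
--     axes = [(za, zn), (xa, xn), (ya, yn)]  # peel order: z, then x, then y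
--     if any(n[0] > a[1] or a[0] > n[1] for a, n in axes):
--         return [active_cuboid]
--     cuts = [(max(a[0], n[0]), min(a[1], n[1])) for a, n in axes]
--     pieces = _carve([a for a, _ in axes], cuts)
--     return [(p[1], p[2], p[0]) for p in pieces
--             if all(iv[0] <= iv[1] for iv in p)]
-- ===== Notes on version B (the rewrite author's own statement) =====
-- stated objective: alternative
-- what changed: B replaces A's six hand-written slab appends with a dimension-generic recursive carve over the axis list in peel order (z,x,y): each call emits the below/above slabs for the head axis and prepends the clipped overlap interval to every piece carved from the tail, followed by one filter/reorder pass.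
import Mathlib
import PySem

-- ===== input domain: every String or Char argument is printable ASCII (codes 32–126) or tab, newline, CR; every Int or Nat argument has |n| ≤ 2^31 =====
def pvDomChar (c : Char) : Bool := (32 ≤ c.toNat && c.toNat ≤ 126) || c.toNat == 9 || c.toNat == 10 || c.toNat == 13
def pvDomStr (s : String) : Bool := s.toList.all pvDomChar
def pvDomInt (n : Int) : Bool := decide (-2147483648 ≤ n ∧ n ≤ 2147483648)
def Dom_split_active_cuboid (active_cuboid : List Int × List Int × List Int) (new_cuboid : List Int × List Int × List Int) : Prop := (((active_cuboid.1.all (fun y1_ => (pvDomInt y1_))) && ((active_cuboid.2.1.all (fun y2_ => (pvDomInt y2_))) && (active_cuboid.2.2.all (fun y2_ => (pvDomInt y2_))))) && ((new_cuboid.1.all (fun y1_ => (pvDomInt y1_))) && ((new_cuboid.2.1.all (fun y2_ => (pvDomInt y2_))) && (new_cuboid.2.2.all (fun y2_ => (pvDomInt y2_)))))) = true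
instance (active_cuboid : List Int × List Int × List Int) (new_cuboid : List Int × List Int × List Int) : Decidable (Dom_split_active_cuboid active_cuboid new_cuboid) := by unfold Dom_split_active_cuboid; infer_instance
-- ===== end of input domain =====

-- B replaces A's six hand-written slab appends with a dimension-generic recursive carve over the
-- axis list in peel order (z, x, y); same pieces, same order (objective: alternative).

-- ===== PORT A =====
-- get_overlap: outer 'none' = IndexError (a raise), 'some none' = Python None, 'some (some l)' = the overlap list
def pvGetOverlap (r1 r2 : List Int) : Option (Option (List Int)) :=
  match PySem.List.pyGet? r2 0, PySem.List.pyGet? r1 1 with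
  | some a2, some b1 =>
    if a2 > b1 then some none
    else match PySem.List.pyGet? r1 0, PySem.List.pyGet? r2 1 with
      | some a1, some b2 =>
        if a1 > b2 then some none
        else some (some [max a1 a2, min b1 b2])
      | _, _ => none
  | _, _ => none

-- the comprehension's keep-condition 'x[0] <= x[1] and y[0] <= y[1] and z[0] <= z[1]'
def pvKeep (p : List Int × List Int × List Int) : Bool :=
  decide (p.1.getD 0 0 ≤ p.1.getD 1 0) && decide (p.2.1.getD 0 0 ≤ p.2.1.getD 1 0) && decide (p.2.2.getD 0 0 ≤ p.2.2.getD 1 0)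

def split_active_cuboid (active_cuboid : List Int × List Int × List Int) (new_cuboid : List Int × List Int × List Int) : List (List Int × List Int × List Int) :=
  let xa := active_cuboid.1; let ya := active_cuboid.2.1; let za := active_cuboid.2.2
  let xn := new_cuboid.1; let yn := new_cuboid.2.1; let zn := new_cuboid.2.2
  match pvGetOverlap xa xn, pvGetOverlap ya yn, pvGetOverlap za zn with
  | some (some xi), some (some yi), some (some zi) =>
    let split : List (List Int × List Int × List Int) :=
      [ (xa, ya, [za.getD 0 0, zi.getD 0 0 - 1]),
        (xa, ya, [zi.getD 1 0 + 1, za.getD 1 0]),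
        ([xa.getD 0 0, xi.getD 0 0 - 1], ya, zi),
        ([xi.getD 1 0 + 1, xa.getD 1 0], ya, zi),
        (xi, [ya.getD 0 0, yi.getD 0 0 - 1], zi),
        (xi, [yi.getD 1 0 + 1, ya.getD 1 0], zi) ]
    split.filter pvKeep
  | some _, some _, some _ => [active_cuboid]   -- some overlap is None → return [active_cuboid]
  | _, _, _ => []                               -- an IndexError was raised (excluded by Pre_)

-- ===== PORT B =====
-- disjointness test 'n[0] > a[1] or a[0] > n[1]' with Python's short-circuit and index raises
-- ('none' = IndexError, excluded by Pre_)
def pvDisj (a n : List Int) : Option Bool :=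
  match PySem.List.pyGet? n 0, PySem.List.pyGet? a 1 with
  | some n0, some a1 =>
    if n0 > a1 then some true
    else match PySem.List.pyGet? a 0, PySem.List.pyGet? n 1 with
      | some a0, some n1 => some (decide (a0 > n1))
      | _, _ => none
  | _, _ => none

-- 'any(...)' over the axis list, short-circuiting like Python's generator
def pvAnyDisj : List (List Int × List Int) → Option Bool
  | [] => some false
  | (a, n) :: t =>
    match pvDisj a n with
    | none => none
    | some true => some true
    | some false => pvAnyDisj t

-- recursive carve from Source B (indexing via getD is exact here: within Pre_ the lists reaching it
-- have the accessed indices)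
def pvCarve : List (List Int) → List (Int × Int) → List (List (List Int))
  | [], _ => []
  | head :: rest, cuts =>
    let lo := (cuts.getD 0 (0, 0)).1
    let hi := (cuts.getD 0 (0, 0)).2
    [[head.getD 0 0, lo - 1] :: rest, [hi + 1, head.getD 1 0] :: rest]
      ++ (pvCarve rest cuts.tail).map (fun p => [lo, hi] :: p)

-- Source B's 'all(iv[0] <= iv[1] for iv in p)' and the (p[1], p[2], p[0]) reorder
def pvOkB (p : List (List Int)) : Bool := p.all (fun iv => decide (iv.getD 0 0 ≤ iv.getD 1 0))
def pvProj (p : List (List Int)) : List Int × List Int × List Int := (p.getD 1 [], p.getD 2 [], p.getD 0 [])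

def split_active_cuboid_alt (active_cuboid : List Int × List Int × List Int) (new_cuboid : List Int × List Int × List Int) : List (List Int × List Int × List Int) :=
  let xa := active_cuboid.1; let ya := active_cuboid.2.1; let za := active_cuboid.2.2
  let xn := new_cuboid.1; let yn := new_cuboid.2.1; let zn := new_cuboid.2.2
  let axes : List (List Int × List Int) := [(za, zn), (xa, xn), (ya, yn)]
  match pvAnyDisj axes with
  | none => []                       -- IndexError (excluded by Pre_)
  | some true => [active_cuboid]
  | some false =>
    let cuts := axes.map (fun an => (max (an.1.getD 0 0) (an.2.getD 0 0), min (an.1.getD 1 0) (an.2.getD 1 0)))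
    let pieces := pvCarve (axes.map Prod.fst) cuts
    (pieces.filter pvOkB).map pvProj

-- ===== PRECONDITION & SPEC =====
-- Pre_: exactly the inputs where A's six r[0]/r[1] index accesses all succeed (Python's 'or'
-- short-circuits, so a too-short r2 is fine when r2[0] > r1[1]); outside it A raises IndexError.
def pvOvOK (r1 r2 : List Int) : Prop := r2 ≠ [] ∧ 2 ≤ r1.length ∧ (r1.getD 1 0 < r2.getD 0 0 ∨ 2 ≤ r2.length)

def Pre_split_active_cuboid (active_cuboid : List Int × List Int × List Int) (new_cuboid : List Int × List Int × List Int) : Prop :=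
  pvOvOK active_cuboid.1 new_cuboid.1 ∧ pvOvOK active_cuboid.2.1 new_cuboid.2.1 ∧ pvOvOK active_cuboid.2.2 new_cuboid.2.2
instance (active_cuboid : List Int × List Int × List Int) (new_cuboid : List Int × List Int × List Int) : Decidable (Pre_split_active_cuboid active_cuboid new_cuboid) := by unfold Pre_split_active_cuboid pvOvOK; infer_instance

def pvWitness_split_active_cuboid : (List Int × List Int × List Int) × (List Int × List Int × List Int) :=
  (([0, 2], [0, 2], [0, 2]), ([1, 3], [1, 3], [1, 3]))

def Spec_split_active_cuboid (active_cuboid : List Int × List Int × List Int) (new_cuboid : List Int × List Int × List Int) (out : List (List Int × List Int × List Int)) : Prop := out = split_active_cuboid_alt active_cuboid new_cuboid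
instance (active_cuboid : List Int × List Int × List Int) (new_cuboid : List Int × List Int × List Int) (out : List (List Int × List Int × List Int)) : Decidable (Spec_split_active_cuboid active_cuboid new_cuboid out) := by unfold Spec_split_active_cuboid; infer_instance

-- ===== CLAIM (what is proved, stated in full; the proofs are below) =====
def Claim_equal_split_active_cuboid : Prop := ∀ (active_cuboid : List Int × List Int × List Int) (new_cuboid : List Int × List Int × List Int), Dom_split_active_cuboid active_cuboid new_cuboid → Pre_split_active_cuboid active_cuboid new_cuboid → Spec_split_active_cuboid active_cuboid new_cuboid (split_active_cuboid active_cuboid new_cuboid)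

-- ===== LEMMAS AND PROOFS =====

-- On an admitted axis pair: B's disjointness bool is 'some b', A's overlap is None iff b, and on
-- overlap A's bounds are exactly the max/min pair B computes.
theorem pvAxis_rel (r1 r2 : List Int) (h : pvOvOK r1 r2) :
    (pvDisj r1 r2 = some true ∧ pvGetOverlap r1 r2 = some none) ∨
    (pvDisj r1 r2 = some false ∧
      pvGetOverlap r1 r2 = some (some [max (r1.getD 0 0) (r2.getD 0 0), min (r1.getD 1 0) (r2.getD 1 0)])) := by
  obtain ⟨h2, h1, hd⟩ := h
  match r1, r2 with
  | a1 :: b1 :: t1, a2 :: t2 =>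
    by_cases hgt : a2 > b1
    · left
      constructor <;> simp [pvDisj, pvGetOverlap, hgt]
    · have ht2 : 2 ≤ t2.length + 1 := by
        rcases hd with hd | hd
        · simp [List.getD] at hd; omega
        · simpa using hd
      match t2 with
      | b2 :: t2' =>
        by_cases hgt2 : a1 > b2
        · left
          constructor <;> simp [pvDisj, pvGetOverlap, hgt, hgt2]
        · right
          constructor <;> simp [pvDisj, pvGetOverlap, hgt, hgt2, List.getD]

-- carve/filter/reorder on B's side equals A's filtered six-piece list, for abstract overlap bounds
theorem carve_eq (xa ya za : List Int) (lx hx ly hy lz hz : Int) :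
    List.filter pvKeep
      [ (xa, ya, [za.getD 0 0, lz - 1]),
        (xa, ya, [hz + 1, za.getD 1 0]),
        ([xa.getD 0 0, lx - 1], ya, [lz, hz]),
        ([hx + 1, xa.getD 1 0], ya, [lz, hz]),
        ([lx, hx], [ya.getD 0 0, ly - 1], [lz, hz]),
        ([lx, hx], [hy + 1, ya.getD 1 0], [lz, hz]) ] =
    List.map pvProj (List.filter pvOkB (pvCarve [za, xa, ya] [(lz, hz), (lx, hx), (ly, hy)])) := by
  have hmem : ∀ x ∈ pvCarve [za, xa, ya] [(lz, hz), (lx, hx), (ly, hy)],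
      pvOkB x = (pvKeep ∘ pvProj) x := by
    intro x hx
    simp only [pvCarve, List.tail_cons, List.map_cons, List.map_nil, List.cons_append,
      List.nil_append, List.getD_cons_zero, List.mem_cons,
      List.not_mem_nil, or_false] at hx
    rcases hx with h | h | h | h | h | h <;> subst h <;>
      simp only [pvOkB, pvKeep, pvProj, Function.comp, List.getD, List.all_cons, List.all_nil,
        List.getElem?_cons_zero, List.getElem?_cons_succ, Option.getD_some, Bool.and_comm, Bool.and_left_comm, Bool.and_assoc] <;> try rfl
  rw [List.filter_congr hmem, ← List.filter_map]
  have hmap : List.map pvProj (pvCarve [za, xa, ya] [(lz, hz), (lx, hx), (ly, hy)]) =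
      [ (xa, ya, [za.getD 0 0, lz - 1]),
        (xa, ya, [hz + 1, za.getD 1 0]),
        ([xa.getD 0 0, lx - 1], ya, [lz, hz]),
        ([hx + 1, xa.getD 1 0], ya, [lz, hz]),
        ([lx, hx], [ya.getD 0 0, ly - 1], [lz, hz]),
        ([lx, hx], [hy + 1, ya.getD 1 0], [lz, hz]) ] := by
    simp [pvCarve, pvProj, List.getD]
  rw [hmap]

theorem case_all (xa ya za xn yn zn : List Int)
    (hxa : pvGetOverlap xa xn = some (some [max (xa.getD 0 0) (xn.getD 0 0), min (xa.getD 1 0) (xn.getD 1 0)]))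
    (hya : pvGetOverlap ya yn = some (some [max (ya.getD 0 0) (yn.getD 0 0), min (ya.getD 1 0) (yn.getD 1 0)]))
    (hza : pvGetOverlap za zn = some (some [max (za.getD 0 0) (zn.getD 0 0), min (za.getD 1 0) (zn.getD 1 0)]))
    (hxb : pvDisj xa xn = some false)
    (hyb : pvDisj ya yn = some false)
    (hzb : pvDisj za zn = some false) :
    split_active_cuboid (xa, ya, za) (xn, yn, zn) = split_active_cuboid_alt (xa, ya, za) (xn, yn, zn) := by
  simp only [split_active_cuboid, split_active_cuboid_alt, pvAnyDisj, hxa, hya, hza, hxb, hyb, hzb,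
    List.map_cons, List.map_nil, List.getD_cons_zero, List.getD_cons_succ]
  exact carve_eq xa ya za (max (xa.getD 0 0) (xn.getD 0 0)) (min (xa.getD 1 0) (xn.getD 1 0))
    (max (ya.getD 0 0) (yn.getD 0 0)) (min (ya.getD 1 0) (yn.getD 1 0))
    (max (za.getD 0 0) (zn.getD 0 0)) (min (za.getD 1 0) (zn.getD 1 0))

theorem main_equiv (ac nc : List Int × List Int × List Int)
    (h : Pre_split_active_cuboid ac nc) :
    split_active_cuboid ac nc = split_active_cuboid_alt ac nc := by
  obtain ⟨xa, ya, za⟩ := ac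
  obtain ⟨xn, yn, zn⟩ := nc
  obtain ⟨hpx, hpy, hpz⟩ := h
  rcases pvAxis_rel xa xn hpx with ⟨hxb, hxa⟩ | ⟨hxb, hxa⟩ <;>
  rcases pvAxis_rel ya yn hpy with ⟨hyb, hya⟩ | ⟨hyb, hya⟩ <;>
  rcases pvAxis_rel za zn hpz with ⟨hzb, hza⟩ | ⟨hzb, hza⟩ <;>
  first
    | exact case_all xa ya za xn yn zn hxa hya hza hxb hyb hzb
    | simp [split_active_cuboid, split_active_cuboid_alt, pvAnyDisj, hxa, hxb, hya, hyb, hza, hzb]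

-- ===== VERDICT (by name: the statement is the Claim_ definition above) =====
theorem split_active_cuboid_spec : Claim_equal_split_active_cuboid := by
  intro ac nc _ hpre
  exact main_equiv ac nc hpre
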